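-- pv_equiv track=rewrite | github.com/AuScope/geomodel-2-3dweb | lib/imports/gocad/gocad_vessel.py | line_gen
-- ===== SOURCE A (Python) =====
-- def line_gen(filename_str, file_lines):
--     ''' This is a Python generator function that processes lines of the GOCAD object file
--         and returns each line in various forms, from quite unprocessed to fully processed
--     :param filename_str: filename of gocad file
--     :param file_lines: array of strings of lines from gocad file
--     :returns array of field strings in upper case with double quotes removed from strings,
--              array of field string in original case without double quotes removed,
--              line of GOCAD file in upper case,
--              boolean, True iff it is the last line of the file
--     '''
--     for line in file_lines:
--         line_str = line.rstrip(' \n\r').upper()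
--         # Look out for double-quoted strings
--         while line_str.count('"') >= 2:
--             before_tup = line_str.partition('"')
--             after_tup = before_tup[2].partition('"')
--             line_str = before_tup[0]+" "+after_tup[0].strip(' ').replace(' ','_')+" "+after_tup[2]
--         splitstr_arr_raw = line.rstrip(' \n\r').split()
--         splitstr_arr = line_str.split()
--
--         # Skip blank lines
--         if len(splitstr_arr)==0:
--             continue
--         yield splitstr_arr, splitstr_arr_raw, line_str, line == file_lines[-1:][0]
--     yield [], [], '', True
-- ===== SOURCE B (Python) =====
-- def _norm(chars):
--     return ''.join(chars).strip(' ').replace(' ', '_')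
--
--
-- def line_gen(filename_str, file_lines):
--     ''' Single-pass re-implementation: instead of repeatedly re-partitioning the
--         line for each quoted string, walk the characters once with an
--         inside/outside-quotes state machine. '''
--     last = file_lines[-1] if file_lines else None
--     for line in file_lines:
--         stripped = line.rstrip(' \n\r')
--         out = []          # rebuilt characters of the processed line
--         quoted = None     # None = outside quotes; else chars inside the open quote
--         for ch in stripped.upper():
--             if ch == '"':
--                 if quoted is None:
--                     quoted = []
--                 else:
--                     out.append(' ')
--                     out.append(_norm(quoted))
--                     out.append(' ')
--                     quoted = None
--             elif quoted is None:
--                 out.append(ch)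
--             else:
--                 quoted.append(ch)
--         if quoted is not None:      # unmatched trailing quote: kept verbatim
--             out.append('"')
--             out.extend(quoted)
--         line_str = ''.join(out)
--         fields = line_str.split()
--         if fields:
--             yield fields, stripped.split(), line_str, line == last
--     yield [], [], '', True
-- ===== Notes on version B (the rewrite author's own statement) =====
-- stated objective: alternative
-- what changed: A repeatedly re-partitions the whole line once per quoted string; B rebuilds the line in a single character-level pass with an inside/outside-quotes state machine.
import Mathlib
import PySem

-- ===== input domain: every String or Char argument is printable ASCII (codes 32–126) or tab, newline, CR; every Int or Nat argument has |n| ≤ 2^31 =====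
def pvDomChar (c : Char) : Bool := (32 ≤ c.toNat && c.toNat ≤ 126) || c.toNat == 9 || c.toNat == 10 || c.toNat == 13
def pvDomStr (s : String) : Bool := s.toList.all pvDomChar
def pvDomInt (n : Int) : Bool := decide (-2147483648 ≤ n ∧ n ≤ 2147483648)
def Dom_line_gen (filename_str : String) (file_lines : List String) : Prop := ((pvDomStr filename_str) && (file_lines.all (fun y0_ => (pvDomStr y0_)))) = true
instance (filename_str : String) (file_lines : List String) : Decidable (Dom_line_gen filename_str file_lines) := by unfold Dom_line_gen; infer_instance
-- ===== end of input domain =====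

-- B replaces A's repeated re-partitioning of the line (one pass per quoted string)
-- by a single character-level state-machine pass; same return values, the generator
-- is materialised as the list of yielded tuples.

-- shared helper: Python s.rstrip(' \n\r') — hand port (PySem has no rstrip-with-chars);
-- exact: drops exactly the characters ' ', '\n', '\r' from the right end.
def rstripSNR (cs : List Char) : List Char :=
  (cs.reverse.dropWhile (fun c => c == ' ' || c == '\n' || c == '\r')).reverse

-- shared helper: the expression  x.strip(' ').replace(' ', '_')  both Pythons apply
-- to the text between a pair of double quotes
def normQ (q : List Char) : List Char :=
  PySem.Chars.replace (PySem.Chars.stripChars q [' ']) [' '] ['_']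

-- ===== PORT A =====
-- one iteration of A's while body: the two partition('"') calls and the rebuild
def quoteStep (cs : List Char) : List Char :=
  let before := cs.takeWhile (fun c => c != '"')
  let rest := (cs.dropWhile (fun c => c != '"')).tail
  let mid := rest.takeWhile (fun c => c != '"')
  let after := (rest.dropWhile (fun c => c != '"')).tail
  before ++ ' ' :: (normQ mid ++ ' ' :: after)

-- A's while loop; fuel = number of '"' in the string, which each iteration lowers
-- by 2, so the fuel never runs out (a guard for totality only, not an algorithm switch)
def quoteLoopA : Nat → List Char → List Char
  | 0, cs => cs
  | fuel+1, cs =>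
    if 2 ≤ PySem.Chars.count cs ['"'] then quoteLoopA fuel (quoteStep cs) else cs

def line_gen (filename_str : String) (file_lines : List String) : List (List String × List String × String × Bool) :=
  (file_lines.foldl (fun acc line =>
      let base := PySem.Chars.upper (rstripSNR line.toList)
      let lineStr := quoteLoopA (base.count '"') base
      let splitstrArrRaw := PySem.Str.split₀ (String.mk (rstripSNR line.toList))
      let splitstrArr := PySem.Str.split₀ (String.mk lineStr)
      if splitstrArr.length = 0 then acc
      else acc ++ [(splitstrArr, splitstrArrRaw, String.mk lineStr,
                    line == (PySem.List.pyGet? (PySem.List.slice file_lines (some (-1)) none) 0).getD "")]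
    ) []) ++ [([], [], "", true)]

-- ===== PORT B =====
-- the character state machine of Source B: st = none means outside quotes,
-- st = some q means inside an open quote with content q so far
def scanB : List Char → List Char → Option (List Char) → List Char
  | [], out, none => out
  | [], out, some q => out ++ '"' :: q
  | c :: rest, out, none =>
    if c == '"' then scanB rest out (some []) else scanB rest (out ++ [c]) none
  | c :: rest, out, some q =>
    if c == '"' then scanB rest (out ++ ' ' :: (normQ q ++ [' '])) none
    else scanB rest out (some (q ++ [c]))

def line_gen_alt (filename_str : String) (file_lines : List String) : List (List String × List String × String × Bool) :=
  let last : Option String := file_lines.getLast?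
  (file_lines.foldl (fun acc line =>
      let stripped := rstripSNR line.toList
      let lineStr := scanB (PySem.Chars.upper stripped) [] none
      let fields := PySem.Str.split₀ (String.mk lineStr)
      if fields.length = 0 then acc
      else acc ++ [(fields, PySem.Str.split₀ (String.mk stripped), String.mk lineStr,
                    some line == last)]
    ) []) ++ [([], [], "", true)]

-- ===== PRECONDITION & SPEC =====
def Spec_line_gen (filename_str : String) (file_lines : List String) (out : List (List String × List String × String × Bool)) : Prop := out = line_gen_alt filename_str file_lines
instance (filename_str : String) (file_lines : List String) (out : List (List String × List String × String × Bool)) : Decidable (Spec_line_gen filename_str file_lines out) := by unfold Spec_line_gen; infer_instance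

-- ===== CLAIM (what is proved, stated in full; the proofs are below) =====
def Claim_equal_line_gen : Prop := ∀ (filename_str : String) (file_lines : List String), Dom_line_gen filename_str file_lines → Spec_line_gen filename_str file_lines (line_gen filename_str file_lines)

-- ===== LEMMAS AND PROOFS =====

-- replace by a single character is a map
lemma replace_go_single (old new : Char) :
    ∀ fuel (l acc : List Char), l.length ≤ fuel →
      PySem.Chars.replace.go [old] [new] fuel l acc
        = acc.reverse ++ l.map (fun c => if c = old then new else c) := by
  intro fuel
  induction fuel with
  | zero => intro l acc h; interval_cases hl : l.length; · simp_all [PySem.Chars.replace.go, List.length_eq_zero_iff.mp hl]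
  | succ f ih =>
    intro l acc h
    cases l with
    | nil => simp [PySem.Chars.replace.go]
    | cons c t =>
      simp only [PySem.Chars.replace.go]
      by_cases hc : c = old
      · simp [hc, List.isPrefixOf, ih t _ (by simpa using Nat.le_of_succ_le_succ h)]
      · simp [List.isPrefixOf, hc, ih t _ (by simpa using Nat.le_of_succ_le_succ h)]
        exact fun e => absurd e.symm hc

lemma replace_single (old new : Char) (l : List Char) :
    PySem.Chars.replace l [old] [new] = l.map (fun c => if c = old then new else c) := by
  simp [PySem.Chars.replace, replace_go_single old new l.length l [] le_rfl]

lemma mem_stripChars {c : Char} {q chars : List Char}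
    (h : c ∈ PySem.Chars.stripChars q chars) : c ∈ q := by
  unfold PySem.Chars.stripChars at h
  rw [List.mem_reverse] at h
  have h2 := (List.dropWhile_sublist _).subset h
  rw [List.mem_reverse] at h2
  exact (List.dropWhile_sublist _).subset h2

lemma normQ_no_quote {q : List Char} (h : '"' ∉ q) : '"' ∉ normQ q := by
  unfold normQ
  rw [replace_single]
  intro hm
  rcases List.mem_map.mp hm with ⟨c, hc, he⟩
  have hcq := mem_stripChars hc
  by_cases hs : c = ' '
  · simp [hs] at he
  · simp [hs] at he; exact h (he ▸ hcq)

-- substring count of a single character is the list count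
lemma count_go_single (a : Char) :
    ∀ fuel (l : List Char) (acc : Nat), l.length ≤ fuel →
      PySem.Chars.count.go [a] fuel l acc = acc + l.count a := by
  intro fuel
  induction fuel with
  | zero => intro l acc h; interval_cases hl : l.length; · simp_all [PySem.Chars.count.go, List.length_eq_zero_iff.mp hl]
  | succ f ih =>
    intro l acc h
    cases l with
    | nil => simp [PySem.Chars.count.go]
    | cons c t =>
      simp only [PySem.Chars.count.go]
      by_cases hc : c = a
      · simp [hc, List.isPrefixOf, ih t _ (by simpa using Nat.le_of_succ_le_succ h),
              List.count_cons]
        omega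
      · simp [List.isPrefixOf, hc, ih t _ (by simpa using Nat.le_of_succ_le_succ h),
              List.count_cons, Ne.symm hc]

lemma count_single (a : Char) (l : List Char) :
    PySem.Chars.count l [a] = l.count a := by
  simp [PySem.Chars.count, count_go_single a l.length l 0 le_rfl]

-- the accumulator of scanB only ever gets appended to
lemma scanB_out_append :
    ∀ (cs out1 out2 : List Char) (st : Option (List Char)),
      scanB cs (out1 ++ out2) st = out1 ++ scanB cs out2 st := by
  intro cs
  induction cs with
  | nil => intro out1 out2 st; cases st <;> simp [scanB]
  | cons c rest ih =>
    intro out1 out2 st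
    cases st with
    | none =>
      by_cases hc : c = '"'
      · simp [scanB, hc, ih]
      · simp [scanB, hc, ← List.append_assoc, ih]
    | some q =>
      by_cases hc : c = '"'
      · simp [scanB, hc, ← List.append_assoc, ih]
      · simp [scanB, hc, ih]

-- a quote-free prefix is copied verbatim while outside quotes
lemma scanB_skip_none :
    ∀ (pre : List Char), '"' ∉ pre → ∀ (rest out : List Char),
      scanB (pre ++ rest) out none = scanB rest (out ++ pre) none := by
  intro pre
  induction pre with
  | nil => simp
  | cons c t ih =>
    intro h rest out
    have hc : c ≠ '"' := fun e => h (e ▸ List.mem_cons_self)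
    have ht : '"' ∉ t := fun m => h (List.mem_cons_of_mem _ m)
    simp [scanB, hc, ih ht, List.append_assoc]

-- a quote-free stretch is collected verbatim while inside quotes
lemma scanB_skip_some :
    ∀ (mid : List Char), '"' ∉ mid → ∀ (rest out q : List Char),
      scanB (mid ++ rest) out (some q) = scanB rest out (some (q ++ mid)) := by
  intro mid
  induction mid with
  | nil => simp
  | cons c t ih =>
    intro h rest out q
    have hc : c ≠ '"' := fun e => h (e ▸ List.mem_cons_self)
    have ht : '"' ∉ t := fun m => h (List.mem_cons_of_mem _ m)
    simp [scanB, hc, ih ht, List.append_assoc]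

-- decompose a list at its first '"'
lemma quote_decomp (l : List Char) (h : '"' ∈ l) :
    l = l.takeWhile (fun c => c != '"') ++ '"' :: (l.dropWhile (fun c => c != '"')).tail
    ∧ '"' ∉ l.takeWhile (fun c => c != '"') := by
  induction l with
  | nil => cases h
  | cons c t ih =>
    by_cases hc : c = '"'
    · subst hc; simp [List.takeWhile_cons, List.dropWhile_cons]
    · have ht : '"' ∈ t := by
        rcases List.mem_cons.mp h with h1 | h1
        · exact absurd h1.symm hc
        · exact h1
      rcases ih ht with ⟨he, hn⟩
      refine ⟨?_, ?_⟩
      · rw [List.takeWhile_cons, List.dropWhile_cons]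
        simp only [hc, bne_iff_ne, ne_eq, not_false_iff, if_true]
        simp [hc]
        exact he
      · rw [List.takeWhile_cons]
        simp [hc]
        exact ⟨fun e => hc e.symm, hn⟩

-- the scan is the identity when the string has at most one '"'
lemma scanB_low (cs : List Char) (h : cs.count '"' ≤ 1) : scanB cs [] none = cs := by
  by_cases h0 : '"' ∈ cs
  · rcases quote_decomp cs h0 with ⟨he, hn⟩
    have hrest : '"' ∉ (cs.dropWhile (fun c => c != '"')).tail := by
      intro hm
      have h2 : 2 ≤ cs.count '"' := by
        conv_lhs at h => rw [he]
        rw [he, List.count_append, List.count_cons_self]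
        have := List.one_le_count_iff.mpr hm
        omega
      omega
    conv_lhs => rw [he]
    rw [scanB_skip_none _ hn]
    rw [show scanB ('"' :: (cs.dropWhile (fun c => c != '"')).tail) (([] : List Char) ++ cs.takeWhile (fun c => c != '"')) none = scanB ((cs.dropWhile (fun c => c != '"')).tail) (cs.takeWhile (fun c => c != '"')) (some []) from by simp [scanB]]
    rw [show ((cs.dropWhile (fun c => c != '"')).tail : List Char) = (cs.dropWhile (fun c => c != '"')).tail ++ [] from by simp]
    rw [scanB_skip_some _ hrest]
    conv_rhs => rw [he]
    simp [scanB]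
  · rw [show cs = cs ++ [] from by simp, scanB_skip_none _ h0]
    simp [scanB]

-- MAIN: A's while loop computes exactly what one state-machine pass computes
lemma quoteLoopA_eq_scanB :
    ∀ (fuel : Nat) (cs : List Char), cs.count '"' ≤ fuel + 1 →
      quoteLoopA fuel cs = scanB cs [] none := by
  intro fuel
  induction fuel with
  | zero =>
    intro cs h
    simp only [quoteLoopA]
    exact (scanB_low cs (by omega)).symm
  | succ f ih =>
    intro cs h
    simp only [quoteLoopA, count_single]
    by_cases hcnt : 2 ≤ cs.count '"'
    · simp only [if_pos hcnt]
      -- decompose cs = pre ++ '"' :: mid ++ '"' :: suf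
      have hmem : '"' ∈ cs := List.one_le_count_iff.mp (by omega)
      rcases quote_decomp cs hmem with ⟨he, hnpre⟩
      set pre := cs.takeWhile (fun c => c != '"') with hpre
      set rest := (cs.dropWhile (fun c => c != '"')).tail with hrest
      have hcrest : rest.count '"' = cs.count '"' - 1 := by
        rw [he, List.count_append, List.count_cons_self,
            List.count_eq_zero.mpr hnpre]
        omega
      have hmem2 : '"' ∈ rest := List.one_le_count_iff.mp (by omega)
      rcases quote_decomp rest hmem2 with ⟨he2, hnmid⟩
      set mid := rest.takeWhile (fun c => c != '"') with hmid
      set suf := (rest.dropWhile (fun c => c != '"')).tail with hsuf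
      have hcsuf : suf.count '"' = cs.count '"' - 2 := by
        have : rest.count '"' = suf.count '"' + 1 := by
          conv_lhs => rw [he2]
          rw [List.count_append, List.count_cons_self, List.count_eq_zero.mpr hnmid]
          omega
        omega
      have hstep : quoteStep cs = pre ++ ' ' :: (normQ mid ++ ' ' :: suf) := rfl
      have hnq := normQ_no_quote hnmid
      have hnprefix : '"' ∉ pre ++ ' ' :: (normQ mid ++ [' ']) := by
        intro hm
        rcases List.mem_append.mp hm with h1 | h1
        · exact hnpre h1
        rcases List.mem_cons.mp h1 with h2 | h2
        · exact absurd h2 (by decide)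
        rcases List.mem_append.mp h2 with h3 | h3
        · exact hnq h3
        · exact absurd h3 (by decide)
      have hcstep : (quoteStep cs).count '"' ≤ f + 1 := by
        rw [hstep]
        have : (pre ++ ' ' :: (normQ mid ++ ' ' :: suf)).count '"'
            = pre.count '"' + ((normQ mid).count '"' + suf.count '"') := by
          simp [List.count_append, List.count_cons]
        rw [this, List.count_eq_zero.mpr hnpre, List.count_eq_zero.mpr hnq, hcsuf]
        omega
      rw [ih _ hcstep, hstep]
      -- evaluate both scans to  prefix ++ scanB suf [] none
      have hR : scanB (pre ++ ' ' :: (normQ mid ++ ' ' :: suf)) [] none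
          = (pre ++ ' ' :: (normQ mid ++ [' '])) ++ scanB suf [] none := by
        rw [show pre ++ ' ' :: (normQ mid ++ ' ' :: suf)
              = (pre ++ ' ' :: (normQ mid ++ [' '])) ++ suf from by simp]
        rw [scanB_skip_none _ hnprefix]
        simpa using scanB_out_append suf (pre ++ ' ' :: (normQ mid ++ [' '])) [] none
      have hL : scanB cs [] none
          = (pre ++ ' ' :: (normQ mid ++ [' '])) ++ scanB suf [] none := by
        conv_lhs => rw [he, he2]
        rw [scanB_skip_none _ hnpre]
        rw [show scanB ('"' :: (mid ++ '"' :: suf)) (([] : List Char) ++ pre) none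
              = scanB (mid ++ '"' :: suf) pre (some []) from by simp [scanB]]
        rw [scanB_skip_some _ hnmid]
        rw [show scanB ('"' :: suf) pre (some ([] ++ mid))
              = scanB suf (pre ++ ' ' :: (normQ mid ++ [' '])) none from by simp [scanB]]
        simpa using scanB_out_append suf (pre ++ ' ' :: (normQ mid ++ [' '])) [] none
      rw [hL, hR]
    · simp only [if_neg hcnt]
      exact (scanB_low cs (by omega)).symm

-- the [-1:][0] expression of A picks out the last element of a nonempty list
lemma last_slice (l : List String) (h : l ≠ []) :
    (PySem.List.pyGet? (PySem.List.slice l (some (-1)) none) 0).getD "" = l.getLast h := by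
  have hlen : 1 ≤ l.length := List.length_pos_iff.mpr h
  have hs : PySem.List.slice l (some (-1)) none = [l.getLast h] := by
    simp only [PySem.List.slice, PySem.List.clampIdx]
    have h1 : ((-1 : Int) < 0) = True := by simp
    have h2 : ¬ ((l.length : Int) + (-1) < 0) := by omega
    simp only [h1, if_true, if_neg h2]
    have h3 : ((l.length : Int) + (-1)).toNat = l.length - 1 := by omega
    rw [h3, List.drop_length_sub_one h]
    have h4 : l.length - (l.length - 1) = 1 := by omega
    simp [h4]
  rw [hs]
  simp [PySem.List.pyGet?, PySem.List.pyIdx?]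

-- ===== VERDICT (by name: the statement is the Claim_ definition above) =====
set_option maxHeartbeats 1000000 in
theorem line_gen_spec : Claim_equal_line_gen := by
  intro filename_str file_lines _dom
  unfold Spec_line_gen line_gen line_gen_alt
  rcases eq_or_ne file_lines [] with hnil | hne
  · subst hnil
    simp only [List.foldl_nil]
  · show List.foldl _ [] file_lines ++ [(([]:List String), ([]:List String), "", true)]
        = List.foldl _ [] file_lines ++ [(([]:List String), ([]:List String), "", true)]
    refine congrArg (fun l => l ++ [(([]:List String), ([]:List String), "", true)]) ?_
    apply PySem.List.foldl_congr_mem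
    intro acc line _hmem
    have hscan : quoteLoopA ((PySem.Chars.upper (rstripSNR line.toList)).count '"')
        (PySem.Chars.upper (rstripSNR line.toList))
        = scanB (PySem.Chars.upper (rstripSNR line.toList)) [] none :=
      quoteLoopA_eq_scanB _ _ (by omega)
    have hlast : (line == (PySem.List.pyGet? (PySem.List.slice file_lines (some (-1)) none) 0).getD "")
        = (some line == file_lines.getLast?) := by
      rw [last_slice file_lines hne, List.getLast?_eq_some_getLast hne]
      simp
    simp only [hscan, hlast]
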